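-- pv_equiv track=rewrite | github.com/utczbr/h2_plant | h2_plant/legacy/H2-StorageModel_21-10-25/H2DemandwithNightShift.py | get_night_shift_status
-- ===== SOURCE A (Python) =====
-- def get_night_shift_status(current_time):
--     # Night shift windows in minutes since start of week (Monday–Thursday only)
--     night_shifts = [
--         (1380, 1860),   # Mon 23:00 – Tue 07:00
--         (2820, 3300),   # Tue 23:00 – Wed 07:00
--         (4260, 4740),   # Wed 23:00 – Thu 07:00
--         (5700, 6180),   # Thu 23:00 – Fri 07:00
--         (7140, 7620),    # Fri 23:00 – Sat 07:00 (if weekend operation is considered)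
--         #(8580, 9060),    # Sat 23:00 – Sun 07:00 (if weekend operation is considered)
--         #(10020, 420)    # Sun 23:00 – Mon 07:00 (if weekend operation is considered)
--     ]
--
--     time_in_week = current_time % 10080  # Wraps for multi-week simulations
--
--     night_shift_active = any(start <= time_in_week < end for start, end in night_shifts)
--
--     return night_shift_active
-- ===== SOURCE B (Python) =====
-- def get_night_shift_status(current_time):
--     # Closed-form modular test: no interval list, no scan.
--     time_in_week = current_time % 10080
--     day, minute = divmod(time_in_week, 1440)
--     return (minute >= 1380 and day <= 4) or (minute < 420 and 1 <= day <= 5)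
-- ===== Notes on version B (the rewrite author's own statement) =====
-- stated objective: simpler
-- what changed: Replaced the scan over the five hard-coded (start,end) intervals with a closed-form day/minute modular test (day = t//1440, minute = t%1440).
import Mathlib
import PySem

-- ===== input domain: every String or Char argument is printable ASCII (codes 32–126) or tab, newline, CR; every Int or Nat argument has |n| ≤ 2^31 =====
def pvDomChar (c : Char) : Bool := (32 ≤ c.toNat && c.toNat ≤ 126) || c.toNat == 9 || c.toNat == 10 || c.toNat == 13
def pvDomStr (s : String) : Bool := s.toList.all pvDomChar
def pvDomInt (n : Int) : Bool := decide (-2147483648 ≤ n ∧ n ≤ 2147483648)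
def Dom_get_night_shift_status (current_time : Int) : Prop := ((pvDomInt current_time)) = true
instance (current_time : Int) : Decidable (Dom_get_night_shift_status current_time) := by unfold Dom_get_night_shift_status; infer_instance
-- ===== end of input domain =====

-- ===== PORT A =====
-- A: scan the five hard-coded night-shift windows
def get_night_shift_status (current_time : Int) : Bool :=
  let night_shifts : List (Int × Int) :=
    [(1380, 1860), (2820, 3300), (4260, 4740), (5700, 6180), (7140, 7620)]
  let time_in_week := PySem.Int.mod current_time 10080
  night_shifts.any (fun se => decide (se.1 ≤ time_in_week) && decide (time_in_week < se.2))

-- ===== PORT B =====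
-- B: closed-form day/minute modular test (simpler: no interval list)
def get_night_shift_status_alt (current_time : Int) : Bool :=
  let time_in_week := PySem.Int.mod current_time 10080
  let day := PySem.Int.floordiv time_in_week 1440
  let minute := PySem.Int.mod time_in_week 1440
  (decide (minute ≥ 1380) && decide (day ≤ 4)) ||
    (decide (minute < 420) && decide (1 ≤ day) && decide (day ≤ 5))

-- ===== PRECONDITION & SPEC =====
def Spec_get_night_shift_status (current_time : Int) (out : Bool) : Prop := out = get_night_shift_status_alt current_time
instance (current_time : Int) (out : Bool) : Decidable (Spec_get_night_shift_status current_time out) := by unfold Spec_get_night_shift_status; infer_instance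

-- ===== CLAIM (what is proved, stated in full; the proofs are below) =====
def Claim_equal_get_night_shift_status : Prop := ∀ (current_time : Int), Dom_get_night_shift_status current_time → Spec_get_night_shift_status current_time (get_night_shift_status current_time)

-- ===== LEMMAS AND PROOFS =====

-- ===== VERDICT (by name: the statement is the Claim_ definition above) =====
theorem get_night_shift_status_spec : Claim_equal_get_night_shift_status := by
  intro t _
  unfold Spec_get_night_shift_status get_night_shift_status get_night_shift_status_alt
  simp only [PySem.Int.mod_eq_emod_of_pos (b := 10080) (by norm_num : (0:Int) < 10080),
      PySem.Int.mod_eq_emod_of_pos (b := 1440) (by norm_num : (0:Int) < 1440),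
      PySem.Int.floordiv_eq_ediv_of_pos (b := 1440) (by norm_num : (0:Int) < 1440)]
  simp only [List.any_cons, List.any_nil, Bool.or_false]
  have h := Int.emod_emod_of_dvd t (by norm_num : (1440:Int) ∣ 10080)
  have h1 := Int.emod_nonneg t (by norm_num : (10080:Int) ≠ 0)
  have h2 := Int.emod_lt_of_pos t (by norm_num : (0:Int) < 10080)
  have h3 := Int.emod_add_mul_ediv (t % 10080) 1440
  have h4 := Int.emod_nonneg (t % 10080) (by norm_num : (1440:Int) ≠ 0)
  have h5 := Int.emod_lt_of_pos (t % 10080) (by norm_num : (0:Int) < 1440)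
  rw [Bool.eq_iff_iff]
  simp only [Bool.or_eq_true, Bool.and_eq_true, decide_eq_true_eq, ge_iff_le]
  omega
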